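-- pv_equiv track=rewrite | github.com/ravip18596/universal-code-template-generators-api | src/template_service/generators/java.py | _dsl_to_java
-- ===== SOURCE A (Python) =====
-- def _dsl_to_java(type_token: str) -> str:
--     """DSL → Java type (boxed when necessary)."""
--     mapping = {
--         "int": "int",
--         "long": "long",
--         "float": "float",
--         "double": "double",
--         "bool": "boolean",
--         "string": "String",
--         "Graph": "Map<Integer, List<Integer>>",
--     }
--     if type_token.endswith("[]"):
--         inner = _dsl_to_java(type_token[:-2])
--         # int[] → List<Integer>
--         if inner in {"int", "long", "float", "double", "boolean"}:
--             boxed = {"int": "Integer", "long": "Long", "float": "Float",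
--                      "double": "Double", "boolean": "Boolean"}[inner]
--             return f"List<{boxed}>"
--         return f"List<{inner}>"
--     if type_token.startswith("List<") and type_token.endswith(">"):
--         inner = _dsl_to_java(type_token[5:-1])
--         return f"List<{inner}>"
--     if type_token.startswith("Tree<") and type_token.endswith(">"):
--         inner = _dsl_to_java(type_token[5:-1])
--         return f"TreeNode<{inner}>"
--     return mapping.get(type_token, "Object")
-- ===== SOURCE B (Python) =====
-- def _dsl_to_java(type_token: str) -> str:
--     """DSL -> Java type: iteratively peel wrappers, then fold them back."""
--     mapping = {
--         "int": "int",
--         "long": "long",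
--         "float": "float",
--         "double": "double",
--         "bool": "boolean",
--         "string": "String",
--         "Graph": "Map<Integer, List<Integer>>",
--     }
--     boxed = {"int": "Integer", "long": "Long", "float": "Float",
--              "double": "Double", "boolean": "Boolean"}
--     markers = []
--     tok = type_token
--     while True:
--         if tok.endswith("[]"):
--             markers.append("array")
--             tok = tok[:-2]
--         elif tok.startswith("List<") and tok.endswith(">"):
--             markers.append("list")
--             tok = tok[5:-1]
--         elif tok.startswith("Tree<") and tok.endswith(">"):
--             markers.append("tree")
--             tok = tok[5:-1]
--         else:
--             break
--     result = mapping.get(tok, "Object")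
--     for m in reversed(markers):
--         if m == "array":
--             if result in boxed:
--                 result = f"List<{boxed[result]}>"
--             else:
--                 result = f"List<{result}>"
--         elif m == "list":
--             result = f"List<{result}>"
--         else:
--             result = f"TreeNode<{result}>"
--     return result
-- ===== Notes on version B (the rewrite author's own statement) =====
-- stated objective: alternative
-- what changed: Replaces A's self-recursion with an explicit iterative peeling loop that collects wrapper markers on a stack and a final fold that rebuilds the Java type innermost-out.
import Mathlib
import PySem

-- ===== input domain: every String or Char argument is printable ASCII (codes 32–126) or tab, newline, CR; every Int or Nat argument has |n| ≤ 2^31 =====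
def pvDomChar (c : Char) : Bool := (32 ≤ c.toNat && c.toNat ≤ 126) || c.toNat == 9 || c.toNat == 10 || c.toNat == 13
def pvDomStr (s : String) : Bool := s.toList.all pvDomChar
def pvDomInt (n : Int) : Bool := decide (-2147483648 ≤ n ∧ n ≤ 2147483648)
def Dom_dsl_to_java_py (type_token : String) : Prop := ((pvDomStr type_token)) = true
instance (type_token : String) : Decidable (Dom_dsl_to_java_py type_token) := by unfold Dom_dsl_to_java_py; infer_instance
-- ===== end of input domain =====

-- B replaces A's self-recursion by an iterative peeling loop plus a fold over the collected
-- wrapper markers (different decomposition, same cost; objective: alternative).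

-- ===== PORT A =====
-- shared literal tables (both Python versions contain the same dict literals)
def javaMapping : PySem.Dict (List Char) (List Char) :=
  PySem.Dict.ofList [("int".toList, "int".toList), ("long".toList, "long".toList),
    ("float".toList, "float".toList), ("double".toList, "double".toList),
    ("bool".toList, "boolean".toList), ("string".toList, "String".toList),
    ("Graph".toList, "Map<Integer, List<Integer>>".toList)]

def javaBoxed : PySem.Dict (List Char) (List Char) :=
  PySem.Dict.ofList [("int".toList, "Integer".toList), ("long".toList, "Long".toList),
    ("float".toList, "Float".toList), ("double".toList, "Double".toList),
    ("boolean".toList, "Boolean".toList)]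

-- termination facts for the slices type_token[:-2] and type_token[5:-1] (cited by both ports)
lemma pvSlice2_lt (cs : List Char) (h : PySem.Chars.endswith cs "[]".toList = true) :
    (PySem.List.slice cs none (some (-2))).length < cs.length := by
  have h2 : 2 ≤ cs.length := by
    have := ((PySem.Chars.endswith_iff (s := cs) (p := "[]".toList)).mp h).length_le
    simpa using this
  rw [PySem.List.slice_to_neg_ofNat cs 2 (by omega)]
  simp; omega

lemma pvSlice5_lt (cs : List Char) (h5 : 5 ≤ cs.length) :
    (PySem.List.slice cs (some 5) (some (-1))).length < cs.length := by
  have hne : cs ≠ [] := by intro h; subst h; simp at h5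
  have := PySem.List.length_slice cs 5 (-1)
  simp [PySem.List.clampIdx, hne] at this
  omega

lemma pvStart5_le (cs p : List Char) (hp : p.length = 5)
    (h : PySem.Chars.startswith cs p = true) : 5 ≤ cs.length := by
  have := ((PySem.Chars.startswith_iff (s := cs) (p := p)).mp h).length_le
  omega

-- literal transliteration of A's recursion
def dslJavaA (cs : List Char) : List Char :=
  if h1 : PySem.Chars.endswith cs "[]".toList then
    let inner := dslJavaA (PySem.List.slice cs none (some (-2)))
    -- membership in the set literal {"int", …}; boxed[inner] is total under that membership
    if inner ∈ ["int".toList, "long".toList, "float".toList, "double".toList, "boolean".toList] then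
      "List<".toList ++ javaBoxed.getD inner [] ++ ">".toList
    else
      "List<".toList ++ inner ++ ">".toList
  else if h2 : PySem.Chars.startswith cs "List<".toList && PySem.Chars.endswith cs ">".toList then
    "List<".toList ++ dslJavaA (PySem.List.slice cs (some 5) (some (-1))) ++ ">".toList
  else if h3 : PySem.Chars.startswith cs "Tree<".toList && PySem.Chars.endswith cs ">".toList then
    "TreeNode<".toList ++ dslJavaA (PySem.List.slice cs (some 5) (some (-1))) ++ ">".toList
  else
    javaMapping.getD cs "Object".toList
termination_by cs.length
decreasing_by
  · exact pvSlice2_lt cs h1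
  · exact pvSlice5_lt cs (pvStart5_le cs _ (by decide) ((Bool.and_eq_true ..).mp h2).1)
  · exact pvSlice5_lt cs (pvStart5_le cs _ (by decide) ((Bool.and_eq_true ..).mp h3).1)

def dsl_to_java_py (type_token : String) : String :=
  String.ofList (dslJavaA type_token.toList)

-- ===== PORT B =====
inductive JMarker | arr | lst | tre
deriving DecidableEq, Repr

-- the while-loop of Source B: peel one wrapper per iteration, pushing its marker
def peelB (cs : List Char) : List JMarker × List Char :=
  if h1 : PySem.Chars.endswith cs "[]".toList then
    let r := peelB (PySem.List.slice cs none (some (-2)))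
    (JMarker.arr :: r.1, r.2)
  else if h2 : PySem.Chars.startswith cs "List<".toList && PySem.Chars.endswith cs ">".toList then
    let r := peelB (PySem.List.slice cs (some 5) (some (-1)))
    (JMarker.lst :: r.1, r.2)
  else if h3 : PySem.Chars.startswith cs "Tree<".toList && PySem.Chars.endswith cs ">".toList then
    let r := peelB (PySem.List.slice cs (some 5) (some (-1)))
    (JMarker.tre :: r.1, r.2)
  else
    ([], cs)
termination_by cs.length
decreasing_by
  · exact pvSlice2_lt cs h1
  · exact pvSlice5_lt cs (pvStart5_le cs _ (by decide) ((Bool.and_eq_true ..).mp h2).1)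
  · exact pvSlice5_lt cs (pvStart5_le cs _ (by decide) ((Bool.and_eq_true ..).mp h3).1)

-- one step of the final for-loop over reversed(markers)
def wrapB (res : List Char) (m : JMarker) : List Char :=
  match m with
  | .arr =>
    if javaBoxed.contains res then
      "List<".toList ++ javaBoxed.getD res [] ++ ">".toList
    else
      "List<".toList ++ res ++ ">".toList
  | .lst => "List<".toList ++ res ++ ">".toList
  | .tre => "TreeNode<".toList ++ res ++ ">".toList

def dsl_to_java_py_alt (type_token : String) : String :=
  let r := peelB type_token.toList
  String.ofList (r.1.reverse.foldl wrapB (javaMapping.getD r.2 "Object".toList))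

-- ===== PRECONDITION & SPEC =====
def Spec_dsl_to_java_py (type_token : String) (out : String) : Prop := out = dsl_to_java_py_alt type_token
instance (type_token : String) (out : String) : Decidable (Spec_dsl_to_java_py type_token out) := by unfold Spec_dsl_to_java_py; infer_instance

-- ===== CLAIM (what is proved, stated in full; the proofs are below) =====
def Claim_equal_dsl_to_java_py : Prop := ∀ (type_token : String), Dom_dsl_to_java_py type_token → Spec_dsl_to_java_py type_token (dsl_to_java_py type_token)

-- ===== LEMMAS AND PROOFS =====

-- A's set-literal membership test coincides with B's `result in boxed`
lemma mem_prims_iff_contains (res : List Char) :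
    (res ∈ ["int".toList, "long".toList, "float".toList, "double".toList, "boolean".toList]) ↔
      javaBoxed.contains res = true := by
  simp [javaBoxed, PySem.Dict.contains, PySem.Dict.ofList]
  norm_num [PySem.Dict.update, PySem.Dict.insert, PySem.Dict.empty, PySem.Dict.items]
  aesop

-- main invariant: A's recursive result = B's peel-then-fold result
lemma foldl_wrap_cons (m : JMarker) (ms : List JMarker) (base : List Char) :
    (m :: ms).reverse.foldl wrapB base = wrapB (ms.reverse.foldl wrapB base) m := by
  simp

lemma dslA_eq_fold (cs : List Char) :
    dslJavaA cs = (peelB cs).1.reverse.foldl wrapB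
      (javaMapping.getD (peelB cs).2 "Object".toList) := by
  induction cs using dslJavaA.induct with
  | case1 cs h1 _inner hm ih =>
      rw [dslJavaA, peelB, dif_pos h1, dif_pos h1, foldl_wrap_cons, ← ih]
      rw [if_pos hm]
      simp only [wrapB]
      rw [if_pos ((mem_prims_iff_contains _).mp hm)]
  | case2 cs h1 _inner hm ih =>
      rw [dslJavaA, peelB, dif_pos h1, dif_pos h1, foldl_wrap_cons, ← ih]
      rw [if_neg hm]
      simp only [wrapB]
      rw [if_neg (fun h => hm ((mem_prims_iff_contains _).mpr h))]
  | case3 cs h1 h2 ih =>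
      rw [dslJavaA, peelB, dif_neg h1, dif_neg h1, dif_pos h2, dif_pos h2,
        foldl_wrap_cons, ← ih]
      rfl
  | case4 cs h1 h2 h3 ih =>
      rw [dslJavaA, peelB, dif_neg h1, dif_neg h1, dif_neg h2, dif_neg h2,
        dif_pos h3, dif_pos h3, foldl_wrap_cons, ← ih]
      rfl
  | case5 cs h1 h2 h3 =>
      rw [dslJavaA, peelB, dif_neg h1, dif_neg h1, dif_neg h2, dif_neg h2,
        dif_neg h3, dif_neg h3]
      rfl

-- ===== VERDICT (by name: the statement is the Claim_ definition above) =====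
theorem dsl_to_java_py_spec : Claim_equal_dsl_to_java_py := by
  intro s _
  unfold Spec_dsl_to_java_py dsl_to_java_py dsl_to_java_py_alt
  rw [dslA_eq_fold]
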